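-- pv_equiv track=rewrite | github.com/IliaFatemi/AdventOfCode | day5/day5.py | rotateCrate
-- ===== SOURCE A (Python) =====
-- def cratify(crates):
--     newCrate = []
--     row = 0
--     numSpaces = 0
--     for i in range(len(crates)):
--         newCrate.append([])
--
--     for crate in crates:
--         for item in crate:
--             if item == '' and numSpaces >= 3:
--                 newCrate[row].append('')
--                 numSpaces = 0
--             elif item != '':
--                 newCrate[row].append(item)
--             else:
--                 numSpaces += 1
--         row += 1
--     newCrate.pop()
--     return newCrate
--
-- def reverseCrateItems(crates):
--     newCrate = []
--     for i in range(len(crates)):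
--         newCrate.append([])
--         for j in range(len(crates[i]), 0, -1):
--
--             newCrate[i].append(crates[i][j-1])
--     return newCrate
--
-- def rotateCrate(crates):
--     newCrate = []
--     cratified = cratify(crates)
--     row = 0
--
--     """
--         [
--             [" ", "D", "", ""],
--             [n, c, , ],
--             [z, m, p, l]
--         ]
--     """
--
--     for i in range(len(cratified[0])):
--         newCrate.append([])
--
--     for crate in cratified:
--         for item in crate:
--             if item == '':
--                 row += 1
--             else:
--                 newCrate[row].append(item)
--                 row += 1
--         row = 0
--     return reverseCrateItems(newCrate)
-- ===== SOURCE B (Python) =====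
-- def rotateCrate(crates):
--     # Closed-form blank rule: the running numSpaces counter of A is just the
--     # global blank count mod 4, so a blank becomes a column slot exactly when
--     # its global blank ordinal is divisible by 4.  Then build each output
--     # column directly by gathering that column's slot from rows bottom-to-top.
--     k = 0
--     toks_rows = []
--     for row in crates[:-1]:
--         toks = []
--         for item in row:
--             if item != '':
--                 toks.append(item)
--             else:
--                 k += 1
--                 if k % 4 == 0:
--                     toks.append('')
--         toks_rows.append(toks)
--     return [[toks[c] for toks in reversed(toks_rows)
--              if c < len(toks) and toks[c] != '']
--             for c in range(len(toks_rows[0]))]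
-- ===== Notes on version B (the rewrite author's own statement) =====
-- stated objective: simpler
-- what changed: B replaces A's three-helper pipeline (pad-with-placeholders stateful scan, running-row-index scatter transpose, reverse-every-row pass) with a closed-form rule — a blank is kept iff its global blank ordinal is divisible by 4, replacing the resetting counter with modular arithmetic — and builds each output column directly by a bottom-to-top gather comprehension, so no placeholder padding, no mutation-scatter and no extra reversal pass remain.
import Mathlib
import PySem

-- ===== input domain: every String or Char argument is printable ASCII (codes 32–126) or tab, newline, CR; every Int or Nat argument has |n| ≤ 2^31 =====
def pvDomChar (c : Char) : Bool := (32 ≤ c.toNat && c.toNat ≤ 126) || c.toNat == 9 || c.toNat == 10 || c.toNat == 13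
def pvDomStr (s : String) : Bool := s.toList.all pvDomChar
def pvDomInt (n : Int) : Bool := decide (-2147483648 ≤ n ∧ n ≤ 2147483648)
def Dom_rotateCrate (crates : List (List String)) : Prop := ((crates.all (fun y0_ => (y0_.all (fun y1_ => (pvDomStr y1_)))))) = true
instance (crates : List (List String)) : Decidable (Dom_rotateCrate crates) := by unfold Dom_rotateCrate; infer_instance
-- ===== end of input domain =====

-- B replaces A's pad/transpose/reverse pipeline: the resetting space counter becomes a
-- closed-form "every 4th global blank is a slot" rule, and output columns are gathered
-- directly bottom-to-top instead of row-scattered then reversed (objective: simpler).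

-- ===== PORT A =====
-- cratify: inner loop over one crate's items; state (newCrate, numSpaces), appending at index `row`
def cratifyInnerA (newCrate : List (List String)) (row : Nat) (ns : Nat) :
    List String → List (List String) × Nat
  | [] => (newCrate, ns)
  | item :: rest =>
    if item = "" ∧ ns ≥ 3 then
      cratifyInnerA (newCrate.modify row (fun c => c ++ [""])) row 0 rest
    else if item ≠ "" then
      cratifyInnerA (newCrate.modify row (fun c => c ++ [item])) row ns rest
    else
      cratifyInnerA newCrate row (ns + 1) rest

-- cratify: outer loop `for crate in crates`, `row += 1` after each crate
def cratifyLoopA (newCrate : List (List String)) (row : Nat) (ns : Nat) :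
    List (List String) → List (List String)
  | [] => newCrate
  | crate :: rest =>
    let p := cratifyInnerA newCrate row ns crate
    cratifyLoopA p.1 (row + 1) p.2 rest

def cratifyA (crates : List (List String)) : List (List String) :=
  -- `for i in range(len(crates)): newCrate.append([])`, then the scan, then `.pop()`
  (cratifyLoopA (crates.map (fun _ => ([] : List String))) 0 0 crates).dropLast

-- reverseCrateItems: inner loop `for j in range(len(crates[i]), 0, -1): append crates[i][j-1]`
def revItemsInnerA (r : List String) : Nat → List String
  | 0 => []
  | j + 1 => r.getD j "" :: revItemsInnerA r j

def reverseCrateItemsA (crates : List (List String)) : List (List String) :=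
  crates.map (fun r => revItemsInnerA r r.length)

-- rotateCrate distribution: inner loop over one crate's items, state (newCrate, row)
def rotInnerA (newCrate : List (List String)) (row : Nat) :
    List String → List (List String) × Nat
  | [] => (newCrate, row)
  | item :: rest =>
    if item = "" then rotInnerA newCrate (row + 1) rest
    else rotInnerA (newCrate.modify row (fun c => c ++ [item])) (row + 1) rest

-- outer loop: `row = 0` after each crate
def rotOuterA (newCrate : List (List String)) : List (List String) → List (List String)
  | [] => newCrate
  | crate :: rest => rotOuterA (rotInnerA newCrate 0 crate).1 rest

-- `for i in range(len(cratified[0])): newCrate.append([])` (Python raises on empty cratified: outside Pre_)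
def rotateCrate (crates : List (List String)) : List (List String) :=
  reverseCrateItemsA
    (rotOuterA (List.replicate ((cratifyA crates).headD []).length ([] : List String))
      (cratifyA crates))

-- ===== PORT B =====
-- `for item in row: if item: append else k += 1; if k % 4 == 0: append ''`
def tokRowB (k : Nat) : List String → List String × Nat
  | [] => ([], k)
  | item :: rest =>
    if item ≠ "" then
      let p := tokRowB k rest; (item :: p.1, p.2)
    else
      let p := tokRowB (k + 1) rest
      (if (k + 1) % 4 == 0 then "" :: p.1 else p.1, p.2)

-- `for row in crates[:-1]: … toks_rows.append(toks)`
def tokRowsB (k : Nat) : List (List String) → List (List String)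
  | [] => []
  | r :: rest =>
    let p := tokRowB k r
    p.1 :: tokRowsB p.2 rest

-- `[[toks[c] for toks in reversed(toks_rows) if c < len(toks) and toks[c] != ''] for c in range(ncols)]`
def rotateCrate_alt (crates : List (List String)) : List (List String) :=
  let tr := tokRowsB 0 crates.dropLast
  (List.range (tr.headD []).length).map (fun c =>
    tr.reverse.filterMap (fun toks =>
      if c < toks.length ∧ toks.getD c "" ≠ "" then some (toks.getD c "") else none))

-- ===== PRECONDITION & SPEC =====
-- Input-shape helpers for Pre_ only: the parsed token list of a row, written as a
-- positional filter (a blank at position j is a slot iff its global blank ordinal,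
-- k0 + blanks-so-far, is divisible by 4).
def pvTokRowPre (k0 : Nat) (r : List String) : List String :=
  (List.range r.length).filterMap (fun j =>
    match r[j]? with
    | none => none
    | some it =>
      if it ≠ "" then some it
      else if (k0 + (r.take (j + 1)).countP (fun s => s = "")) % 4 == 0 then some "" else none)

def pvToksPre (crates : List (List String)) : List (List String) :=
  (List.range crates.length).map (fun i =>
    pvTokRowPre (((crates.take i).flatten).countP (fun s => s = "")) (crates.getD i []))

-- Pre_ excludes exactly the inputs where Python A raises an IndexError: fewer than two
-- rows, or a later parsed row carrying a non-blank token beyond the first row's width.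
def Pre_rotateCrate (crates : List (List String)) : Prop :=
  2 ≤ crates.length ∧
  ∀ r ∈ (pvToksPre crates.dropLast).drop 1, ∀ c < r.length,
    r.getD c "" ≠ "" → c < ((pvToksPre crates.dropLast).headD []).length
instance (crates : List (List String)) : Decidable (Pre_rotateCrate crates) := by
  unfold Pre_rotateCrate; infer_instance

def pvWitness_rotateCrate : List (List String) :=
  [["a", "b"], ["c", ""], ["x", "y"]]

def Spec_rotateCrate (crates : List (List String)) (out : List (List String)) : Prop := out = rotateCrate_alt crates
instance (crates : List (List String)) (out : List (List String)) : Decidable (Spec_rotateCrate crates out) := by unfold Spec_rotateCrate; infer_instance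

-- ===== CLAIM (what is proved, stated in full; the proofs are below) =====
def Claim_equal_rotateCrate : Prop := ∀ (crates : List (List String)), Dom_rotateCrate crates → Pre_rotateCrate crates → Spec_rotateCrate crates (rotateCrate crates)

-- ===== LEMMAS AND PROOFS =====

-- modify at the length of the left part of an append
theorem modify_append_cons {α : Type} (done : List α) (cur : α) (pad : List α) (f : α → α) :
    (done ++ cur :: pad).modify done.length f = done ++ f cur :: pad := by
  induction done with
  | nil => simp [List.modify]
  | cons d ds ih => simpa [List.modify] using ih

-- A's resetting space counter equals B's global blank count mod 4
theorem cratifyInnerA_eq (crate : List String) :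
    ∀ (done : List (List String)) (cur : List String) (pad : List (List String)) (k : Nat),
      cratifyInnerA (done ++ cur :: pad) done.length (k % 4) crate =
        (done ++ (cur ++ (tokRowB k crate).1) :: pad, (tokRowB k crate).2 % 4) := by
  induction crate with
  | nil => intro done cur pad k; simp [cratifyInnerA, tokRowB]
  | cons item rest ih =>
    intro done cur pad k
    by_cases hi : item = ""
    · by_cases hk : (k + 1) % 4 = 0
      · have h3 : k % 4 ≥ 3 := by omega
        rw [cratifyInnerA, if_pos ⟨hi, h3⟩, modify_append_cons]
        have h0 : (0 : Nat) = (k + 1) % 4 := hk.symm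
        rw [h0, ih done (cur ++ [""]) pad (k + 1)]
        simp [tokRowB, hi, hk]
      · have h3 : ¬ (item = "" ∧ k % 4 ≥ 3) := by
          rintro ⟨-, h⟩; omega
        rw [cratifyInnerA, if_neg h3, if_neg (by simp [hi])]
        have h1 : k % 4 + 1 = (k + 1) % 4 := by omega
        rw [h1, ih done cur pad (k + 1)]
        simp [tokRowB, hi, hk]
    · rw [cratifyInnerA, if_neg (by tauto), if_pos hi, modify_append_cons,
        ih done (cur ++ [item]) pad k]
      simp [tokRowB, hi]

-- cratify's outer loop builds exactly B's tokenized rows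
theorem cratifyLoopA_eq (crates : List (List String)) :
    ∀ (done : List (List String)) (k : Nat),
      cratifyLoopA (done ++ List.replicate crates.length ([] : List String)) done.length (k % 4) crates =
        done ++ tokRowsB k crates := by
  induction crates with
  | nil => intro done k; simp [cratifyLoopA, tokRowsB]
  | cons crate rest ih =>
    intro done k
    have h1 : List.replicate (crate :: rest).length ([] : List String) =
        ([] : List String) :: List.replicate rest.length ([] : List String) := rfl
    rw [h1]
    show cratifyLoopA _ _ _ _ = _
    rw [cratifyLoopA]
    rw [cratifyInnerA_eq crate done [] (List.replicate rest.length ([] : List String)) k]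
    have h2 : done ++ ([] ++ (tokRowB k crate).1) :: List.replicate rest.length ([] : List String) =
        (done ++ [(tokRowB k crate).1]) ++ List.replicate rest.length ([] : List String) := by simp
    have h3 : done.length + 1 = (done ++ [(tokRowB k crate).1]).length := by simp
    simp only [h2, h3]
    rw [ih (done ++ [(tokRowB k crate).1]) (tokRowB k crate).2]
    simp [tokRowsB]

theorem cratifyA_eq (crates : List (List String)) :
    cratifyA crates = (tokRowsB 0 crates).dropLast := by
  unfold cratifyA
  have := cratifyLoopA_eq crates [] 0
  simpa [List.map_const'] using congrArg List.dropLast this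

-- tokenization commutes with dropping the last row
theorem tokRowsB_ne_nil (k : Nat) (r : List String) (rest : List (List String)) :
    tokRowsB k (r :: rest) ≠ [] := by
  rw [tokRowsB]; exact List.cons_ne_nil _ _

theorem tokRowsB_dropLast : ∀ (l : List (List String)) (k : Nat),
    (tokRowsB k l).dropLast = tokRowsB k l.dropLast := by
  intro l
  induction l with
  | nil => intro k; simp [tokRowsB]
  | cons r rest ih =>
    intro k
    cases rest with
    | nil => simp [tokRowsB]
    | cons r2 rs =>
      rw [tokRowsB, List.dropLast_cons_of_ne_nil (tokRowsB_ne_nil _ _ _),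
        ih, show (r :: r2 :: rs).dropLast = r :: (r2 :: rs).dropLast from rfl, tokRowsB]

-- proof-only restatement of A's distribution loops in accumulator form
def fillRowA (cols : List (List String)) (c : Nat) : List String → List (List String)
  | [] => cols
  | item :: rest =>
    if item ≠ "" then fillRowA (cols.modify c (fun col => col ++ [item])) (c + 1) rest
    else fillRowA cols (c + 1) rest

def fillAllA (cols : List (List String)) : List (List String) → List (List String)
  | [] => cols
  | r :: rest => fillAllA (fillRowA cols 0 r) rest

theorem rotInnerA_fst (crate : List String) :
    ∀ (nc : List (List String)) (c : Nat), (rotInnerA nc c crate).1 = fillRowA nc c crate := by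
  induction crate with
  | nil => intro nc c; simp [rotInnerA, fillRowA]
  | cons item rest ih =>
    intro nc c
    by_cases hi : item = "" <;> simp [rotInnerA, fillRowA, hi, ih]

theorem rotOuterA_eq : ∀ (rs : List (List String)) (nc : List (List String)),
    rotOuterA nc rs = fillAllA nc rs := by
  intro rs
  induction rs with
  | nil => intro nc; simp [rotOuterA, fillAllA]
  | cons r rest ih => intro nc; simp [rotOuterA, fillAllA, rotInnerA_fst, ih]

-- reverseCrateItems reverses every row
theorem revItemsInnerA_eq (r : List String) : ∀ n, n ≤ r.length →
    revItemsInnerA r n = (r.take n).reverse := by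
  intro n
  induction n with
  | zero => intro _; simp [revItemsInnerA]
  | succ j ih =>
    intro h
    have hj : j < r.length := by omega
    rw [revItemsInnerA, ih (by omega), ← List.take_concat_get (l := r) (i := j),
      List.concat_eq_append, List.reverse_append]
    · simp [List.getD, List.getElem?_eq_getElem hj]
    · exact hj

theorem reverseCrateItemsA_eq (l : List (List String)) :
    reverseCrateItemsA l = l.map List.reverse := by
  unfold reverseCrateItemsA
  refine List.map_congr_left (fun r _ => ?_)
  simpa using revItemsInnerA_eq r r.length le_rfl

-- the token a row r contributes to column c
def colTok (c : Nat) (r : List String) : Option String :=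
  match r[c]? with
  | none => none
  | some s => if s = "" then none else some s

theorem getElem?_fillRowA (r : List String) :
    ∀ (cols : List (List String)) (c i : Nat),
      (fillRowA cols c r)[i]? =
        (cols[i]?).map (fun col => col ++ (if i < c then [] else (colTok (i - c) r).toList)) := by
  induction r with
  | nil =>
    intro cols c i
    cases h : cols[i]? <;> simp [fillRowA, colTok, h]
  | cons item rest ih =>
    intro cols c i
    by_cases hi : item = ""
    · rw [fillRowA, if_neg (by simp [hi])]
      rw [ih cols (c + 1) i]
      rcases Nat.lt_trichotomy i c with h | h | h
      · simp [Nat.lt_succ_of_lt h, h]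
      · subst h
        simp [colTok, hi]
      · have h1 : ¬ i < c + 1 := by omega
        have h2 : ¬ i < c := by omega
        have h3 : i - c = (i - (c + 1)) + 1 := by omega
        simp only [if_neg h1, if_neg h2, h3]
        rfl
    · rw [fillRowA, if_pos (by simp [hi])]
      rw [ih _ (c + 1) i]
      rw [List.getElem?_modify]
      rcases Nat.lt_trichotomy i c with h | h | h
      · have : ¬ c = i := by omega
        cases hc : cols[i]? <;> simp [this, Nat.lt_succ_of_lt h, h]
      · subst h
        cases hc : cols[i]? <;>
          simp [colTok, hi]
      · have h1 : ¬ i < c + 1 := by omega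
        have h2 : ¬ i < c := by omega
        have hne : ¬ c = i := by omega
        have h3 : i - c = (i - (c + 1)) + 1 := by omega
        cases hc : cols[i]? with
        | none => simp [hne]
        | some col =>
          simp only [Option.map_some, if_neg h1, if_neg h2, h3, hne]
          rfl

theorem getElem?_fillAllA : ∀ (rs : List (List String)) (cols : List (List String)) (i : Nat),
    (fillAllA cols rs)[i]? = (cols[i]?).map (fun col => col ++ rs.filterMap (colTok i)) := by
  intro rs
  induction rs with
  | nil => intro cols i; cases h : cols[i]? <;> simp [fillAllA, h]
  | cons r rest ih =>
    intro cols i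
    rw [fillAllA, ih, getElem?_fillRowA]
    cases hc : cols[i]? with
    | none => simp
    | some col =>
      simp only [Option.map_some, List.filterMap_cons]
      cases ht : colTok i r <;> simp

-- B's per-column gather predicate coincides with colTok
theorem colTok_eq_gather (c : Nat) (toks : List String) :
    (if c < toks.length ∧ toks.getD c "" ≠ "" then some (toks.getD c "") else none) =
      colTok c toks := by
  unfold colTok
  by_cases hc : c < toks.length
  · rw [List.getElem?_eq_getElem hc]
    have hd : toks.getD c "" = toks[c] := by
      simp [List.getD, List.getElem?_eq_getElem hc]
    by_cases he : toks[c] = "" <;> simp [hc, he]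
  · rw [List.getElem?_eq_none (by omega)]
    simp [hc]

-- ===== VERDICT (by name: the statement is the Claim_ definition above) =====
theorem rotateCrate_spec : Claim_equal_rotateCrate := by
  intro crates _ _
  unfold Spec_rotateCrate rotateCrate rotateCrate_alt
  rw [cratifyA_eq, tokRowsB_dropLast, rotOuterA_eq, reverseCrateItemsA_eq]
  apply List.ext_getElem?
  intro i
  rw [List.getElem?_map, getElem?_fillAllA, List.getElem?_map]
  cases hc : (List.replicate ((tokRowsB 0 crates.dropLast).headD []).length
      ([] : List String))[i]? with
  | none =>
    have hi : ((tokRowsB 0 crates.dropLast).headD []).length ≤ i := by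
      by_contra h
      rw [List.getElem?_replicate, if_pos (by omega)] at hc
      simp at hc
    rw [List.getElem?_eq_none (by simpa using hi)]
    simp
  | some col =>
    have hi : i < ((tokRowsB 0 crates.dropLast).headD []).length := by
      by_contra h
      rw [List.getElem?_replicate, if_neg h] at hc
      simp at hc
    have hcol : col = [] := by
      have := List.mem_of_getElem? hc
      simpa using List.eq_of_mem_replicate this
    subst hcol
    rw [List.getElem?_range hi]
    simp only [Option.map_some, List.nil_append]
    congr 1
    rw [← List.filterMap_reverse]
    exact (List.filterMap_congr (fun toks _ => colTok_eq_gather i toks)).symm
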